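-- pv_equiv track=rewrite | github.com/rajewsky-lab/spacemake | spacemake/tag_alignments.py | select_genes
-- ===== SOURCE A (Python) =====
-- def select_genes(strand, gn_list, gf_list, gs_list):
--     prio = {
--         # sense-match, exonic
--         (True, True): 0,
--         (True, False): 1,
--         (False, True): 20,
--         (False, False): 30,
--     }
--     results = []
--     best = 10000
--     for i, (gn, gf, gs) in enumerate(zip(gn_list, gf_list, gs_list)):
--         sense_match = gs == strand
--         exonic = (gf == "UTR") or (gf == "CODING")
--         p = prio[(sense_match, exonic)]
--         results.append((p, gn, i))
--         best = min(best, p)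
--
--     genes = set()
--     gf = ""
--     for p, gn, i in results:
--         if p == best:
--             genes.add(gn)
--             gf = gf_list[i]
--
--     genes = list(genes)
--     if len(genes) == 1:
--         return genes[0], gf
--     else:
--         return ",".join(sorted(genes)), gf
-- ===== SOURCE B (Python) =====
-- def select_genes(strand, gn_list, gf_list, gs_list):
--     prio = {
--         # sense-match, exonic
--         (True, True): 0,
--         (True, False): 1,
--         (False, True): 20,
--         (False, False): 30,
--     }
--     best = 10000
--     genes = set()
--     gf = ""
--     for gn, gf_i, gs in zip(gn_list, gf_list, gs_list):
--         p = prio[(gs == strand, gf_i == "UTR" or gf_i == "CODING")]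
--         if p < best:
--             best = p
--             genes = {gn}
--             gf = gf_i
--         elif p == best:
--             genes.add(gn)
--             gf = gf_i
--     return ",".join(sorted(genes)), gf
-- ===== Notes on version B (the rewrite author's own statement) =====
-- stated objective: alternative
-- what changed: A builds the full (priority, gene, index) results list, takes the global minimum, then rescans it indexing back into gf_list; B is one streaming pass that keeps only the current best priority, its gene set and the last matching gf, never materialising the results list.
import Mathlib
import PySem

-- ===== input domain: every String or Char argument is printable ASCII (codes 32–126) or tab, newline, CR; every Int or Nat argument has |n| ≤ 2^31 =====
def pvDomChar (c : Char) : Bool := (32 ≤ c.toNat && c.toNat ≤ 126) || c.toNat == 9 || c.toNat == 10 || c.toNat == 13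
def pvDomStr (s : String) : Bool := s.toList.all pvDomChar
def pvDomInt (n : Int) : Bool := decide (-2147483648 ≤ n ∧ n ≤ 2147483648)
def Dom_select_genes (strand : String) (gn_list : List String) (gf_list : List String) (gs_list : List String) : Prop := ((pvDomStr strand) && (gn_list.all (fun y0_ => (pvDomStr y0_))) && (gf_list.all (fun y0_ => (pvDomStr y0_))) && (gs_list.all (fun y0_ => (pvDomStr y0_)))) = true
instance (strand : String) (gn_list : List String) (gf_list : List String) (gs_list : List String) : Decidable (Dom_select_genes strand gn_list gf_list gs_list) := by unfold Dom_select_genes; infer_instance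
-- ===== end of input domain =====

-- B replaces A's two passes (build full (p, gene, index) list, take min, rescan with gf_list[i])
-- by ONE streaming pass keeping only the current best priority, its gene set and gf (objective: alternative).

-- ===== PORT A =====
-- the priority dict shared by both ports (a module-level constant in spirit; both Pythons write the same literal)
def pvPrio : PySem.Dict (Bool × Bool) Int :=
  PySem.Dict.ofList [((true, true), 0), ((true, false), 1), ((false, true), 20), ((false, false), 30)]

def select_genes (strand : String) (gn_list : List String) (gf_list : List String) (gs_list : List String) : String × String :=
  let zipped := List.zip gn_list (List.zip gf_list gs_list)
  let st := (PySem.List.enumerate zipped 0).foldl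
      (fun (acc : List (Int × String × Int) × Int) e =>
        let sense_match := e.2.2.2 == strand
        let exonic := (e.2.2.1 == "UTR") || (e.2.2.1 == "CODING")
        let p := pvPrio.getD (sense_match, exonic) 0
        (acc.1 ++ [(p, e.2.1, e.1)], min acc.2 p))
      ([], 10000)
  let st2 := st.1.foldl
      (fun (acc : PySem.Set String × String) r =>
        if r.1 == st.2 then (PySem.Set.add acc.1 r.2.1, PySem.List.pyGetD gf_list r.2.2 "") else acc)
      (PySem.Set.empty, "")
  if st2.1.length == 1 then (PySem.List.pyGetD st2.1 0 "", st2.2)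
  else (PySem.Str.join "," (PySem.List.sorted st2.1 (fun x => x) false), st2.2)

-- ===== PORT B =====
def select_genes_alt (strand : String) (gn_list : List String) (gf_list : List String) (gs_list : List String) : String × String :=
  let st := (List.zip gn_list (List.zip gf_list gs_list)).foldl
      (fun (acc : Int × PySem.Set String × String) e =>
        let p := pvPrio.getD (e.2.2 == strand, (e.2.1 == "UTR") || (e.2.1 == "CODING")) 0
        if p < acc.1 then (p, PySem.Set.ofList [e.1], e.2.1)
        else if p == acc.1 then (acc.1, PySem.Set.add acc.2.1 e.1, e.2.1)
        else acc)
      (10000, PySem.Set.empty, "")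
  (PySem.Str.join "," (PySem.List.sorted st.2.1 (fun x => x) false), st.2.2)

-- ===== PRECONDITION & SPEC =====
def Spec_select_genes (strand : String) (gn_list : List String) (gf_list : List String) (gs_list : List String) (out : String × String) : Prop := out = select_genes_alt strand gn_list gf_list gs_list
instance (strand : String) (gn_list : List String) (gf_list : List String) (gs_list : List String) (out : String × String) : Decidable (Spec_select_genes strand gn_list gf_list gs_list out) := by unfold Spec_select_genes; infer_instance

-- ===== CLAIM (what is proved, stated in full; the proofs are below) =====
def Claim_equal_select_genes : Prop := ∀ (strand : String) (gn_list : List String) (gf_list : List String) (gs_list : List String), Dom_select_genes strand gn_list gf_list gs_list → Spec_select_genes strand gn_list gf_list gs_list (select_genes strand gn_list gf_list gs_list)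

-- ===== LEMMAS AND PROOFS =====

-- priority of one zipped entry (proof-only helper)
def pvP (strand : String) (e : String × String × String) : Int :=
  pvPrio.getD (e.2.2 == strand, (e.2.1 == "UTR") || (e.2.1 == "CODING")) 0

-- running minimum of the priorities
def pvMin (ts : List (Int × String × String)) (b : Int) : Int :=
  ts.foldl (fun a t => min a t.1) b

-- the winner-collecting pass (A's second loop, with gf carried in the triple)
def pvS (best : Int) (ts : List (Int × String × String)) (acc : PySem.Set String × String) :
    PySem.Set String × String :=
  ts.foldl (fun acc t => if t.1 == best then (PySem.Set.add acc.1 t.2.1, t.2.2) else acc) acc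

theorem pvMin_le (ts : List (Int × String × String)) (b : Int) : pvMin ts b ≤ b := by
  induction ts generalizing b with
  | nil => simp [pvMin]
  | cons t ts ih =>
      have h := ih (min b t.1)
      simp only [pvMin, List.foldl_cons] at *
      exact le_trans h (min_le_left _ _)

-- B's single pass computes the running minimum together with the winner-collecting pass
theorem pvB_fold (ts : List (Int × String × String)) : ∀ (b : Int)
    (G : PySem.Set String) (g : String),
    ts.foldl
      (fun (acc : Int × PySem.Set String × String) t =>
        if t.1 < acc.1 then (t.1, PySem.Set.ofList [t.2.1], t.2.2)
        else if t.1 == acc.1 then (acc.1, PySem.Set.add acc.2.1 t.2.1, t.2.2)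
        else acc) (b, G, g)
    = (pvMin ts b,
       if pvMin ts b < b then pvS (pvMin ts b) ts (PySem.Set.empty, "")
       else pvS (pvMin ts b) ts (G, g)) := by
  induction ts with
  | nil => intro b G g; simp [pvMin, pvS]
  | cons t ts ih =>
      intro b G g
      simp only [pvMin, pvS, List.foldl_cons] at ih ⊢
      have hle := pvMin_le ts (min b t.1)
      simp only [pvMin] at hle
      rcases lt_trichotomy t.1 b with h | h | h
      · have hmin : min b t.1 = t.1 := by omega
        simp only [hmin] at hle ⊢
        rw [if_pos h, ih]
        rcases eq_or_lt_of_le hle with he | hl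
        · simp only [he]
          simp [h, PySem.Set.ofList, PySem.Set.empty]
        · have hne : ¬ (t.1 == ts.foldl (fun a t => min a t.1) t.1) = true := by
            simp; omega
          simp [hne, show ts.foldl (fun a t => min a t.1) t.1 < t.1 from hl,
                show ts.foldl (fun a t => min a t.1) t.1 < b by omega]
      · have hmin : min b t.1 = b := by omega
        simp only [hmin] at hle ⊢
        rw [if_neg (by omega : ¬ t.1 < b), if_pos (by simp [h]), ih]
        rcases eq_or_lt_of_le hle with he | hl
        · simp only [he]
          simp [h]
        · have hne : ¬ (t.1 == ts.foldl (fun a t => min a t.1) b) = true := by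
            simp; omega
          simp [hne, hl]
      · have hmin : min b t.1 = b := by omega
        simp only [hmin] at hle ⊢
        rw [if_neg (by omega : ¬ t.1 < b), if_neg (by simp; omega), ih]
        have hne : ¬ (t.1 == ts.foldl (fun a t => min a t.1) b) = true := by
          simp; omega
        simp [hne]

-- A's second loop over (p, gn, i) triples equals pvS over (p, gn, gf) triples,
-- given elementwise correspondence through gf_list
def pvR (gfl : List String) (a : Int × String × Int) (t : Int × String × String) : Prop :=
  a.1 = t.1 ∧ a.2.1 = t.2.1 ∧ PySem.List.pyGetD gfl a.2.2 "" = t.2.2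

theorem pvA_second (gfl : List String) (best : Int) :
    ∀ {l1 : List (Int × String × Int)} {l2 : List (Int × String × String)},
    List.Forall₂ (pvR gfl) l1 l2 → ∀ acc,
    l1.foldl
      (fun (acc : PySem.Set String × String) r =>
        if r.1 == best then (PySem.Set.add acc.1 r.2.1, PySem.List.pyGetD gfl r.2.2 "") else acc)
      acc = pvS best l2 acc := by
  intro l1 l2 h
  induction h with
  | nil => intro acc; simp [pvS]
  | cons hr _ ih =>
      intro acc
      obtain ⟨h1, h2, h3⟩ := hr
      simp only [pvS, List.foldl_cons] at *
      rw [h1, h2, h3, ih]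


-- A's first loop builds the mapped results list and the running min
theorem pvA_first (strand : String) (l : List (String × String × String)) :
    ∀ (s : Int) (acc : List (Int × String × Int)) (b : Int),
    (PySem.List.enumerate l s).foldl
      (fun (acc : List (Int × String × Int) × Int) e =>
        (acc.1 ++ [(pvPrio.getD (e.2.2.2 == strand, (e.2.2.1 == "UTR") || (e.2.2.1 == "CODING")) 0, e.2.1, e.1)],
         min acc.2 (pvPrio.getD (e.2.2.2 == strand, (e.2.2.1 == "UTR") || (e.2.2.1 == "CODING")) 0)))
      (acc, b)
    = (acc ++ (PySem.List.enumerate l s).map (fun e => (pvP strand e.2, e.2.1, e.1)),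
       pvMin (l.map (fun e => (pvP strand e, e.1, e.2.1))) b) := by
  induction l with
  | nil => intro s acc b; simp [PySem.List.enumerate_nil, pvMin]
  | cons x xs ih =>
      intro s acc b
      simp only [PySem.List.enumerate_cons, List.foldl_cons, List.map_cons, pvMin, pvP]
      rw [ih]
      simp [pvMin, pvP]

theorem pvCorr (strand : String) (gn gf gs : List String) :
    List.Forall₂ (pvR gf)
      ((PySem.List.enumerate (gn.zip (gf.zip gs)) 0).map (fun e => (pvP strand e.2, e.2.1, e.1)))
      ((gn.zip (gf.zip gs)).map (fun e => (pvP strand e, e.1, e.2.1))) := by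
  rw [List.forall₂_iff_get]
  constructor
  · simp [PySem.List.length_enumerate]
  · intro i h1 h2
    simp only [List.get_eq_getElem, List.getElem_map, PySem.List.getElem_enumerate]
    have hi : i < (gn.zip (gf.zip gs)).length := by
      simpa [PySem.List.length_enumerate] using h1
    have higf : i < gf.length := by
      simp [List.length_zip] at hi; omega
    refine ⟨rfl, rfl, ?_⟩
    have : ((0 : Int) + i) = (i : Int) := by omega
    rw [this, PySem.List.pyGetD_natCast]
    simp [List.getD_eq_getElem?_getD, List.getElem?_eq_getElem higf, List.getElem_zip]

theorem pv_single (x : String) :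
    PySem.List.pyGetD [x] 0 "" = PySem.Str.join "," (PySem.List.sorted [x] (fun y => y) false) := by
  simp [PySem.List.pyGetD, PySem.List.sorted, PySem.Str.join, PySem.Chars.join, PySem.List.insertBy, List.intercalate]

theorem pv_main (strand : String) (gn_list gf_list gs_list : List String) :
    select_genes strand gn_list gf_list gs_list = select_genes_alt strand gn_list gf_list gs_list := by
  simp only [select_genes, select_genes_alt]
  rw [pvA_first strand (gn_list.zip (gf_list.zip gs_list)) 0 [] 10000]
  rw [show (List.zip gn_list (gf_list.zip gs_list)).foldl
      (fun (acc : Int × PySem.Set String × String) e =>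
        if pvPrio.getD (e.2.2 == strand, (e.2.1 == "UTR") || (e.2.1 == "CODING")) 0 < acc.1 then
          (pvPrio.getD (e.2.2 == strand, (e.2.1 == "UTR") || (e.2.1 == "CODING")) 0,
           PySem.Set.ofList [e.1], e.2.1)
        else if pvPrio.getD (e.2.2 == strand, (e.2.1 == "UTR") || (e.2.1 == "CODING")) 0 == acc.1 then
          (acc.1, PySem.Set.add acc.2.1 e.1, e.2.1)
        else acc) (10000, PySem.Set.empty, "")
    = ((gn_list.zip (gf_list.zip gs_list)).map (fun e => (pvP strand e, e.1, e.2.1))).foldl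
      (fun (acc : Int × PySem.Set String × String) t =>
        if t.1 < acc.1 then (t.1, PySem.Set.ofList [t.2.1], t.2.2)
        else if t.1 == acc.1 then (acc.1, PySem.Set.add acc.2.1 t.2.1, t.2.2)
        else acc) (10000, PySem.Set.empty, "") from by rw [List.foldl_map]; rfl]
  rw [pvB_fold]
  rw [ite_self]
  simp only [List.nil_append]
  rw [pvA_second gf_list _ (pvCorr strand gn_list gf_list gs_list)]
  rcases hpr : pvS (pvMin ((gn_list.zip (gf_list.zip gs_list)).map (fun e => (pvP strand e, e.1, e.2.1))) 10000)
      ((gn_list.zip (gf_list.zip gs_list)).map (fun e => (pvP strand e, e.1, e.2.1)))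
      (PySem.Set.empty, "") with ⟨genes, gfv⟩
  by_cases hlen : genes.length = 1
  · obtain ⟨x, hx⟩ := List.length_eq_one_iff.mp hlen
    subst hx
    simp [pv_single x]
  · simp [hlen]

-- ===== VERDICT (by name: the statement is the Claim_ definition above) =====
theorem select_genes_spec : Claim_equal_select_genes := by
  intro strand gn_list gf_list gs_list _dom
  exact pv_main strand gn_list gf_list gs_list
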